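-- pv_equiv track=rewrite | github.com/philosucker/Text_Holdem | core/dealer/dealer.py | _find_optimal_combination
-- ===== SOURCE A (Python) =====
-- from itertools import combinations
--
-- def _find_optimal_combination(winner_list, contributors):
--     max_overlap = 0
--     optimal_combination = []
--
--     for subset_size in range(1, len(winner_list) + 1):  # 부분집합 크기를 1부터 시작
--         for combo in combinations(winner_list, subset_size):
--             overlap = len(set(combo) & set(contributors))
--             if overlap > max_overlap:
--                 max_overlap = overlap
--                 optimal_combination = list(combo)
--             elif overlap == max_overlap and len(combo) < len(optimal_combination):
--                 optimal_combination = list(combo)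
--
--     return optimal_combination
-- ===== SOURCE B (Python) =====
-- def _find_optimal_combination(winner_list, contributors):
--     cset = set(contributors)
--     seen = set()
--     result = []
--     for w in winner_list:
--         if w in cset and w not in seen:
--             seen.add(w)
--             result.append(w)
--     return result
-- ===== Notes on version B (the rewrite author's own statement) =====
-- stated objective: faster
-- what changed: Replaced the exhaustive search over all subsets of winner_list (ordered by size, then combination order) with a single pass that collects the first occurrence of each distinct winner that is a contributor; this is exactly the subset the exhaustive search settles on.
import Mathlib
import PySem

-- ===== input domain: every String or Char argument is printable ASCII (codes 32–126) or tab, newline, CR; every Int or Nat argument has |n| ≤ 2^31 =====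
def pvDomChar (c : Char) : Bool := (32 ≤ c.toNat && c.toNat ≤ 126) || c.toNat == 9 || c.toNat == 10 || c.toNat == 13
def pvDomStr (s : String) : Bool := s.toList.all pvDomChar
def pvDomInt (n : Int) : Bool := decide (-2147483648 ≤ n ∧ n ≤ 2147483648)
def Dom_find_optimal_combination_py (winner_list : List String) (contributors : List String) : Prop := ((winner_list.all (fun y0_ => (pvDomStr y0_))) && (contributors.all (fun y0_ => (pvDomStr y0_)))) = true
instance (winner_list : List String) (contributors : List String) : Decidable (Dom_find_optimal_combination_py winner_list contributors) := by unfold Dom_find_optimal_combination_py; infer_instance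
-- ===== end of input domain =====

-- B replaces A's exhaustive subset search with a single first-occurrence-collecting pass; equal output, asymptotically faster.

-- ===== PORT A =====
-- itertools.combinations(xs, k), in Python's yield order (lexicographic by index)
def pyCombos : Nat → List String → List (List String)
  | 0, _ => [[]]
  | _ + 1, [] => []
  | k + 1, x :: xs => ((pyCombos k xs).map (fun c => x :: c)) ++ pyCombos (k + 1) xs

-- overlap = len(set(combo) & set(contributors))
def pyOverlap (contributors : List String) (combo : List String) : Int :=
  PySem.Set.len (PySem.Set.inter (PySem.Set.ofList combo) (PySem.Set.ofList contributors))

-- the body of A's inner loop, acting on the state (max_overlap, optimal_combination)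
def pyStep (contributors : List String) (st : Int × List String) (combo : List String) : Int × List String :=
  let overlap := pyOverlap contributors combo
  if overlap > st.1 then (overlap, combo)
  else if overlap = st.1 ∧ combo.length < st.2.length then (st.1, combo)
  else st

def find_optimal_combination_py (winner_list : List String) (contributors : List String) : List String :=
  ((PySem.List.pyRange 1 ((winner_list.length : Int) + 1)).foldl
    (fun st sz => (pyCombos sz.toNat winner_list).foldl (pyStep contributors) st)
    ((0 : Int), ([] : List String))).2

-- ===== PORT B =====
-- the body of B's loop, acting on the state (seen, result)
def altStep (cset : PySem.Set String) (st : PySem.Set String × List String) (w : String) :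
    PySem.Set String × List String :=
  if PySem.Set.contains cset w && !(PySem.Set.contains st.1 w) then (PySem.Set.add st.1 w, st.2 ++ [w])
  else st

def find_optimal_combination_py_alt (winner_list : List String) (contributors : List String) : List String :=
  (winner_list.foldl (altStep (PySem.Set.ofList contributors)) (PySem.Set.empty, [])).2

-- ===== PRECONDITION & SPEC =====
def Spec_find_optimal_combination_py (winner_list : List String) (contributors : List String) (out : List String) : Prop := out = find_optimal_combination_py_alt winner_list contributors
instance (winner_list : List String) (contributors : List String) (out : List String) : Decidable (Spec_find_optimal_combination_py winner_list contributors out) := by unfold Spec_find_optimal_combination_py; infer_instance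

-- ===== CLAIM (what is proved, stated in full; the proofs are below) =====
def Claim_equal_find_optimal_combination_py : Prop := ∀ (winner_list : List String) (contributors : List String), Dom_find_optimal_combination_py winner_list contributors → Spec_find_optimal_combination_py winner_list contributors (find_optimal_combination_py winner_list contributors)

-- ===== LEMMAS AND PROOFS =====

-- the first occurrence of each distinct element of xs that lies in cs and not in seen
def firsts (cs : List String) (seen : List String) : List String → List String
  | [] => []
  | x :: xs => if x ∈ cs ∧ x ∉ seen then x :: firsts cs (x :: seen) xs else firsts cs seen xs

-- B's fold computes `firsts`
theorem altStep_invariant (cs : List String) : ∀ (xs s seen : List String) (res : List String),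
    (∀ y, y ∈ s ↔ y ∈ seen) →
    (xs.foldl (altStep (PySem.Set.ofList cs)) (s, res)).2 = res ++ firsts cs seen xs := by
  intro xs
  induction xs with
  | nil => intro s seen res _; simp [firsts]
  | cons x xs ih =>
    intro s seen res hmem
    simp only [List.foldl_cons, altStep, firsts]
    by_cases hx : x ∈ cs ∧ x ∉ seen
    · have hc : (PySem.Set.contains (PySem.Set.ofList cs) x && !PySem.Set.contains s x) = true := by
        simp only [Bool.and_eq_true, Bool.not_eq_true']
        constructor
        · exact (PySem.Set.contains_iff _ _).mpr ((PySem.Set.mem_ofList _ _).mpr hx.1)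
        · rw [← Bool.not_eq_true, PySem.Set.contains_iff]
          exact fun h => hx.2 ((hmem x).mp h)
      rw [hc]
      simp only [if_true, if_pos hx]
      rw [ih (PySem.Set.add s x) (x :: seen) (res ++ [x])
        (by intro y; rw [PySem.Set.mem_add]; simp [hmem y, or_comm])]
      simp
    · have hc : (PySem.Set.contains (PySem.Set.ofList cs) x && !PySem.Set.contains s x) = false := by
        rw [Bool.and_eq_false_iff]
        by_cases h1 : x ∈ cs
        · right
          simp only [Bool.not_eq_false']
          exact (PySem.Set.contains_iff _ _).mpr ((hmem x).mpr (by tauto))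
        · left
          rw [← Bool.not_eq_true, PySem.Set.contains_iff, PySem.Set.mem_ofList]
          exact h1
      rw [hc, if_neg hx]
      exact ih s seen res hmem

theorem alt_eq_firsts (w cs : List String) :
    find_optimal_combination_py_alt w cs = firsts cs [] w := by
  have := altStep_invariant cs w PySem.Set.empty [] [] (by intro y; simp [PySem.Set.empty])
  simpa [find_optimal_combination_py_alt] using this

-- basic facts about firsts
theorem firsts_spec (cs : List String) : ∀ (xs seen : List String),
    (firsts cs seen xs).Nodup ∧ ∀ x ∈ firsts cs seen xs, x ∈ xs ∧ x ∈ cs ∧ x ∉ seen := by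
  intro xs
  induction xs with
  | nil => intro seen; simp [firsts]
  | cons a xs ih =>
    intro seen
    simp only [firsts]
    by_cases h : a ∈ cs ∧ a ∉ seen
    · rw [if_pos h]
      obtain ⟨hnd, hm⟩ := ih (a :: seen)
      refine ⟨List.nodup_cons.mpr ⟨fun hc => ((hm a hc).2.2 (by simp)), hnd⟩, ?_⟩
      intro x hx
      rcases List.mem_cons.mp hx with rfl | hx
      · exact ⟨by simp, h.1, h.2⟩
      · obtain ⟨h1, h2, h3⟩ := hm x hx
        exact ⟨by simp [h1], h2, fun hs => h3 (by simp [hs])⟩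
    · rw [if_neg h]
      obtain ⟨hnd, hm⟩ := ih seen
      exact ⟨hnd, fun x hx => ⟨by simp [(hm x hx).1], (hm x hx).2⟩⟩

theorem mem_firsts (cs : List String) : ∀ (xs seen : List String) (x : String),
    x ∈ firsts cs seen xs ↔ x ∈ xs ∧ x ∈ cs ∧ x ∉ seen := by
  intro xs
  induction xs with
  | nil => intro seen x; simp [firsts]
  | cons a xs ih =>
    intro seen x
    simp only [firsts]
    by_cases h : a ∈ cs ∧ a ∉ seen
    · rw [if_pos h]
      constructor
      · intro hx
        rcases List.mem_cons.mp hx with rfl | hx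
        · exact ⟨by simp, h.1, h.2⟩
        · obtain ⟨h1, h2, h3⟩ := (ih (a :: seen) x).mp hx
          exact ⟨by simp [h1], h2, fun hs => h3 (by simp [hs])⟩
      · rintro ⟨h1, h2, h3⟩
        rcases List.mem_cons.mp h1 with rfl | h1
        · exact List.mem_cons_self
        · by_cases hxa : x = a
          · subst hxa; exact List.mem_cons_self
          · exact List.mem_cons_of_mem _ ((ih (a :: seen) x).mpr
              ⟨h1, h2, by simp [hxa, h3]⟩)
    · rw [if_neg h]
      rw [ih seen x]
      constructor
      · rintro ⟨h1, h2, h3⟩; exact ⟨List.mem_cons_of_mem _ h1, h2, h3⟩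
      · rintro ⟨h1, h2, h3⟩
        rcases List.mem_cons.mp h1 with rfl | h1
        · exact absurd ⟨h2, h3⟩ h
        · exact ⟨h1, h2, h3⟩

theorem length_firsts_le (cs : List String) : ∀ (xs seen : List String),
    (firsts cs seen xs).length ≤ xs.length := by
  intro xs
  induction xs with
  | nil => intro seen; simp [firsts]
  | cons a xs ih =>
    intro seen
    simp only [firsts]
    by_cases h : a ∈ cs ∧ a ∉ seen
    · rw [if_pos h]; simpa using ih (a :: seen)
    · rw [if_neg h]; exact Nat.le_succ_of_le (ih seen)

-- nodup-subset length bound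
theorem nodup_subset_length {l l' : List String} (h : l.Nodup) (hs : ∀ x ∈ l, x ∈ l') :
    l.length ≤ l'.length := by
  calc l.length = l.toFinset.card := (List.toFinset_card_of_nodup h).symm
    _ ≤ l'.toFinset.card := Finset.card_le_card (fun x hx => by
        simpa using hs x (by simpa using hx))
    _ ≤ l'.length := List.toFinset_card_le l'

-- pyCombos facts
theorem pyCombos_mem_spec : ∀ (xs : List String) (k : Nat) (c : List String),
    c ∈ pyCombos k xs → c.length = k ∧ ∀ x ∈ c, x ∈ xs := by
  intro xs
  induction xs with
  | nil =>
    intro k c hc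
    cases k with
    | zero => simp [pyCombos] at hc; simp [hc]
    | succ k => simp [pyCombos] at hc
  | cons a xs ih =>
    intro k c hc
    cases k with
    | zero => simp [pyCombos] at hc; simp [hc]
    | succ k =>
      simp only [pyCombos, List.mem_append, List.mem_map] at hc
      rcases hc with ⟨c', hc', rfl⟩ | hc
      · obtain ⟨h1, h2⟩ := ih k c' hc'
        refine ⟨by simp [h1], ?_⟩
        intro x hx
        rcases List.mem_cons.mp hx with rfl | hx
        · simp
        · exact List.mem_cons_of_mem _ (h2 x hx)
      · obtain ⟨h1, h2⟩ := ih (k + 1) c hc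
        exact ⟨h1, fun x hx => List.mem_cons_of_mem _ (h2 x hx)⟩

-- The distinct-overlap count, as a Nat
def ovN (cs c : List String) : Nat :=
  (PySem.Set.inter (PySem.Set.ofList c) (PySem.Set.ofList cs)).length

theorem pyOverlap_eq_ovN (cs c : List String) : pyOverlap cs c = (ovN cs c : Int) := rfl

theorem ofList_sublist : ∀ (xs : List String), (PySem.Set.ofList xs).Sublist xs := by
  intro xs
  induction xs with
  | nil => simp [PySem.Set.ofList]
  | cons a xs ih =>
    rw [PySem.Set.ofList_cons]
    exact List.Sublist.cons₂ a (List.Sublist.trans (List.filter_sublist) ih)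

theorem ovN_le_length (cs c : List String) : ovN cs c ≤ c.length := by
  unfold ovN PySem.Set.inter
  calc (List.filter _ (PySem.Set.ofList c)).length ≤ (PySem.Set.ofList c).length :=
        List.length_filter_le _ _
    _ ≤ c.length := PySem.Set.length_ofList_le c

theorem ovN_le_firsts (w cs c : List String) (hsub : ∀ x ∈ c, x ∈ w) :
    ovN cs c ≤ (firsts cs [] w).length := by
  apply nodup_subset_length
  · exact PySem.Set.nodup_inter _ _ (PySem.Set.nodup_ofList c)
  · intro x hx
    obtain ⟨h1, h2⟩ := (PySem.Set.mem_inter _ _ x).mp hx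
    rw [PySem.Set.mem_ofList] at h1 h2
    exact (mem_firsts cs w [] x).mpr ⟨hsub x h1, h2, by simp⟩

theorem ovN_eq_of_good (cs c : List String) (hnd : c.Nodup) (hcs : ∀ x ∈ c, x ∈ cs) :
    ovN cs c = c.length := by
  unfold ovN PySem.Set.inter
  rw [PySem.Set.ofList_eq_self_of_nodup c hnd]
  congr 1
  rw [List.filter_eq_self]
  intro x hx
  exact (PySem.Set.contains_iff _ _).mpr ((PySem.Set.mem_ofList _ _).mpr (hcs x hx))

theorem good_of_ovN_eq (cs c : List String) (h : ovN cs c = c.length) :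
    c.Nodup ∧ ∀ x ∈ c, x ∈ cs := by
  unfold ovN PySem.Set.inter at h
  have h1 : (List.filter (fun x => (PySem.Set.ofList cs).contains x) (PySem.Set.ofList c)).length
      ≤ (PySem.Set.ofList c).length := List.length_filter_le _ _
  have h2 : (PySem.Set.ofList c).length ≤ c.length := PySem.Set.length_ofList_le c
  have e2 : (PySem.Set.ofList c).length = c.length := le_antisymm h2 (by omega)
  have eOf : PySem.Set.ofList c = c := List.Sublist.eq_of_length (ofList_sublist c) e2
  have e1 : List.filter (fun x => (PySem.Set.ofList cs).contains x) (PySem.Set.ofList c)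
      = PySem.Set.ofList c :=
    List.Sublist.eq_of_length (List.filter_sublist) (by omega)
  constructor
  · rw [← eOf]; exact PySem.Set.nodup_ofList c
  · intro x hx
    have := List.filter_eq_self.mp e1 x (by rw [eOf]; exact hx)
    rw [PySem.Set.contains_iff, PySem.Set.mem_ofList] at this
    exact this

-- the crux: in pyCombos D xs (Python's combination order), the first size-D combo that is
-- nodup, inside cs and disjoint from seen is exactly `firsts cs seen xs`
theorem firsts_first_combo (cs : List String) : ∀ (xs seen : List String),
    ∃ pre post, pyCombos (firsts cs seen xs).length xs = pre ++ (firsts cs seen xs) :: post ∧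
      ∀ c ∈ pre, ¬(c.Nodup ∧ (∀ x ∈ c, x ∈ cs) ∧ (∀ x ∈ c, x ∉ seen)) := by
  intro xs
  induction xs with
  | nil => intro seen; exact ⟨[], [], by simp [firsts, pyCombos], by simp⟩
  | cons a xs ih =>
    intro seen
    by_cases h : a ∈ cs ∧ a ∉ seen
    · simp only [firsts, if_pos h]
      obtain ⟨pre', post', heq, hbad⟩ := ih (a :: seen)
      refine ⟨pre'.map (fun c => a :: c),
        (post'.map (fun c => a :: c)) ++ pyCombos ((firsts cs (a :: seen) xs).length + 1) xs, ?_, ?_⟩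
      · show pyCombos ((firsts cs (a :: seen) xs).length + 1) (a :: xs) = _
        simp only [pyCombos, heq, List.map_append, List.map_cons]
        simp
      · intro c hc
        obtain ⟨c', hc', rfl⟩ := List.mem_map.mp hc
        rintro ⟨hnd, hcs, hseen⟩
        refine hbad c' hc' ⟨(List.nodup_cons.mp hnd).2, fun x hx => hcs x (by simp [hx]), ?_⟩
        intro x hx hmem
        rcases List.mem_cons.mp hmem with rfl | hmem
        · exact (List.nodup_cons.mp hnd).1 hx
        · exact hseen x (by simp [hx]) hmem
    · simp only [firsts, if_neg h]
      obtain ⟨pre', post', heq, hbad⟩ := ih seen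
      cases hk : (firsts cs seen xs).length with
      | zero =>
        refine ⟨[], [], ?_, by simp⟩
        have : firsts cs seen xs = [] := List.eq_nil_of_length_eq_zero hk
        simp [this, pyCombos]
      | succ k =>
        rw [hk] at heq
        refine ⟨(pyCombos k xs).map (fun c => a :: c) ++ pre', post', ?_, ?_⟩
        · show pyCombos (k + 1) (a :: xs) = _
          simp only [pyCombos, heq]
          simp
        · intro c hc
          rcases List.mem_append.mp hc with hc | hc
          · obtain ⟨c', _, rfl⟩ := List.mem_map.mp hc
            rintro ⟨_, hcs, hseen⟩
            exact h ⟨hcs a (by simp), hseen a (by simp)⟩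
          · exact hbad c hc

theorem pyStep_gt (cs c : List String) (st : Int × List String)
    (h : pyOverlap cs c > st.1) : pyStep cs st c = (pyOverlap cs c, c) := by
  unfold pyStep
  dsimp only
  rw [if_pos h]

-- fold lemmas for A's update step
theorem foldl_step_fst_le (cs : List String) : ∀ (L : List (List String)) (st : Int × List String)
    (k : Int), st.1 ≤ k → (∀ c ∈ L, pyOverlap cs c ≤ k) →
    (L.foldl (pyStep cs) st).1 ≤ k := by
  intro L
  induction L with
  | nil => intro st k h _; simpa using h
  | cons c L ih =>
    intro st k h hov
    simp only [List.foldl_cons]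
    apply ih
    · unfold pyStep
      dsimp only
      split_ifs <;> simp_all [hov c (by simp)]
    · intro c' hc'; exact hov c' (by simp [hc'])

theorem foldl_step_const (cs : List String) : ∀ (L : List (List String)) (st : Int × List String),
    (∀ c ∈ L, ¬(pyOverlap cs c > st.1 ∨ (pyOverlap cs c = st.1 ∧ c.length < st.2.length))) →
    L.foldl (pyStep cs) st = st := by
  intro L
  induction L with
  | nil => intro st _; simp
  | cons c L ih =>
    intro st h
    have hc := h c (by simp)
    have h1 : ¬(pyOverlap cs c > st.1) := fun hh => hc (Or.inl hh)
    have h2 : ¬(pyOverlap cs c = st.1 ∧ c.length < st.2.length) := fun hh => hc (Or.inr hh)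
    simp only [List.foldl_cons]
    have hstep : pyStep cs st c = st := by
      unfold pyStep
      dsimp only
      rw [if_neg h1, if_neg h2]
    rw [hstep]
    exact ih st (fun c' hc' => h c' (by simp [hc']))

-- folding A's step over flatMap
theorem foldl_flatMap_step (cs : List String) (g : Nat → List (List String)) :
    ∀ (l : List Nat) (st : Int × List String),
    (l.flatMap g).foldl (pyStep cs) st = l.foldl (fun st k => (g k).foldl (pyStep cs) st) st := by
  intro l
  induction l with
  | nil => intro st; simp
  | cons a l ih => intro st; simp [List.flatMap_cons, List.foldl_append, ih]

-- pyRange 1 (n+1) is the Int image of range' 1 n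
theorem pyRange_one_eq (n : Nat) :
    PySem.List.pyRange 1 ((n : Int) + 1) = (List.range' 1 n).map (fun k => (k : Int)) := by
  induction n with
  | zero => simp [PySem.List.pyRange]
  | succ n ih =>
    have : PySem.List.pyRange 1 ((n : Int) + 1 + 1)
        = PySem.List.pyRange 1 ((n : Int) + 1) ++ PySem.List.pyRange ((n : Int) + 1) ((n : Int) + 1 + 1) := by
      apply PySem.List.pyRange_one_append <;> omega
    rw [show ((n + 1 : Nat) : Int) + 1 = (n : Int) + 1 + 1 by push_cast; ring, this, ih]
    have h2 : PySem.List.pyRange ((n : Int) + 1) ((n : Int) + 1 + 1)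
        = [(n : Int) + 1] := by
      rw [PySem.List.pyRange_one_cons (by omega)]
      simp [PySem.List.pyRange]
    rw [h2, List.range'_concat]
    simp
    omega

theorem foldl_sizes_cast (cs w : List String) : ∀ (l : List Nat) (st : Int × List String),
    (l.map (fun k => (k : Int))).foldl
      (fun st sz => (pyCombos sz.toNat w).foldl (pyStep cs) st) st
    = l.foldl (fun st k => (pyCombos k w).foldl (pyStep cs) st) st := by
  intro l
  induction l with
  | nil => intro st; simp
  | cons a l ih =>
    intro st
    simp only [List.foldl_cons]
    exact ih _

-- ===== main proof =====
theorem a_eq_firsts (w cs : List String) :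
    find_optimal_combination_py w cs = firsts cs [] w := by
  set F := firsts cs [] w with hF
  set D := F.length with hD
  set n := w.length with hn
  have hDn : D ≤ n := length_firsts_le cs w []
  -- rewrite the port's nested fold as a single fold over the flattened combination list
  have hport : find_optimal_combination_py w cs
      = (((List.range' 1 n).flatMap (fun k => pyCombos k w)).foldl (pyStep cs)
          ((0 : Int), ([] : List String))).2 := by
    unfold find_optimal_combination_py
    rw [pyRange_one_eq n, foldl_sizes_cast, foldl_flatMap_step cs (fun k => pyCombos k w)]
  rw [hport]
  -- facts about F
  have hFgood : F.Nodup ∧ ∀ x ∈ F, x ∈ cs := by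
    obtain ⟨h1, h2⟩ := firsts_spec cs w []
    exact ⟨h1, fun x hx => (h2 x hx).2.1⟩
  have hovF : ovN cs F = D := (ovN_eq_of_good cs F hFgood.1 hFgood.2).trans hD.symm
  -- global bounds
  have hov_le : ∀ k, ∀ c ∈ pyCombos k w, ovN cs c ≤ D := by
    intro k c hc
    exact ovN_le_firsts w cs c (pyCombos_mem_spec w k c hc).2
  by_cases hD0 : D = 0
  · -- no winner is a contributor: the state never changes
    have hFnil : F = [] := List.eq_nil_of_length_eq_zero (hD ▸ hD0)
    rw [foldl_step_const]
    · simp [hFnil]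
    · intro c hc
      obtain ⟨k, hk, hck⟩ := List.mem_flatMap.mp hc
      have h1 := hov_le k c hck
      rw [pyOverlap_eq_ovN]
      have hc0 : ovN cs c = 0 := by omega
      simp [hc0]
  · -- D ≥ 1: split the size list at D
    have hD1 : 1 ≤ D := Nat.one_le_iff_ne_zero.mpr hD0
    have hsplit : List.range' 1 n = List.range' 1 (D - 1) ++ D :: List.range' (D + 1) (n - D) := by
      calc List.range' 1 n = List.range' 1 ((D - 1) + ((n - D) + 1)) := by
            rw [show (D - 1) + ((n - D) + 1) = n by omega]
        _ = List.range' 1 (D - 1) ++ List.range' (1 + (D - 1)) ((n - D) + 1) := by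
            rw [List.range'_append_1]
        _ = List.range' 1 (D - 1) ++ D :: List.range' (D + 1) (n - D) := by
            rw [show 1 + (D - 1) = D by omega, List.range'_succ]
    obtain ⟨pre, post, hcombD, hbad⟩ := firsts_first_combo cs w []
    simp only [← hF, ← hD] at hcombD hbad
    rw [hsplit]
    simp only [List.flatMap_append, List.flatMap_cons, List.foldl_append, hcombD]
    -- step 1: after sizes 1..D-1 the running max is below D
    set st1 := (((List.range' 1 (D - 1)).flatMap fun k => pyCombos k w).foldl (pyStep cs)
      ((0 : Int), ([] : List String))) with hst1
    have hst1le : st1.1 ≤ (D : Int) - 1 := by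
      apply foldl_step_fst_le
      · simp; omega
      · intro c hc
        obtain ⟨k, hk, hck⟩ := List.mem_flatMap.mp hc
        rw [List.mem_range'_1] at hk
        have := (pyCombos_mem_spec w k c hck).1
        have := ovN_le_length cs c
        rw [pyOverlap_eq_ovN]
        omega
    -- step 2: within size D, the prefix `pre` keeps the max below D
    have hst2le : (pre.foldl (pyStep cs) st1).1 ≤ (D : Int) - 1 := by
      apply foldl_step_fst_le
      · exact hst1le
      · intro c hc
        have hcD : c ∈ pyCombos D w := by rw [hcombD]; simp [hc]
        have hlen := (pyCombos_mem_spec w D c hcD).1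
        have hle : ovN cs c ≤ D := hov_le D c hcD
        have hne : ovN cs c ≠ D := by
          intro he
          exact hbad c hc (by
            have := good_of_ovN_eq cs c (by omega)
            exact ⟨this.1, this.2, by simp⟩)
        rw [pyOverlap_eq_ovN]; omega
    -- step 3: F itself is taken
    have hstF : pyStep cs (pre.foldl (pyStep cs) st1) F = ((D : Int), F) := by
      rw [pyStep_gt cs F _ (by rw [pyOverlap_eq_ovN, hovF]; omega)]
      rw [pyOverlap_eq_ovN, hovF]
    rw [List.foldl_cons, hstF]
    -- step 4: everything after F leaves the state unchanged
    have hrest : ∀ (L : List (List String)), (∀ c ∈ L, ovN cs c ≤ D ∧ D ≤ c.length) →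
        (L.foldl (pyStep cs) ((D : Int), F)).2 = F := by
      intro L hL
      rw [foldl_step_const]
      intro c hc
      obtain ⟨h1, h2⟩ := hL c hc
      rw [pyOverlap_eq_ovN]
      simp only [not_or, not_and, not_lt]
      constructor
      · omega
      · intro _; simp only [← hD]; omega
    have hpost : (post.foldl (pyStep cs) ((D : Int), F)) = ((D : Int), F) := by
      apply foldl_step_const
      intro c hc
      have hcD : c ∈ pyCombos D w := by rw [hcombD]; simp [hc]
      have hlen := (pyCombos_mem_spec w D c hcD).1
      have h1 := hov_le D c hcD
      rw [pyOverlap_eq_ovN]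
      simp only [not_or, not_and, not_lt]
      exact ⟨by omega, fun _ => by simp only [← hD]; omega⟩
    rw [hpost]
    apply hrest
    intro c hc
    obtain ⟨k, hk, hck⟩ := List.mem_flatMap.mp hc
    rw [List.mem_range'_1] at hk
    have hlen := (pyCombos_mem_spec w k c hck).1
    exact ⟨hov_le k c hck, by omega⟩

-- ===== VERDICT (by name: the statement is the Claim_ definition above) =====
theorem find_optimal_combination_py_spec : Claim_equal_find_optimal_combination_py := by
  intro winner_list contributors _
  unfold Spec_find_optimal_combination_py
  rw [a_eq_firsts, alt_eq_firsts]
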